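-- pv_equiv track=rewrite | github.com/ucsb-cs9-f21/lab03_n_setiawan | lab03.py | collectOddValues
-- ===== SOURCE A (Python) =====
-- def collectOddValues(listOfInt):
--     n = []
--     if(listOfInt != []):
--         if(listOfInt[0]%2 == 1):
--             n.append(listOfInt[0])
--
--         return n + collectOddValues(listOfInt[1:])
--     else:
--         return []
-- #def countIntsOld(listOfInt, num):
--     x = 0
--     for i in range(len(listOfInt)):
--         if(listOfInt[i] != num):
--             if i == 0:
--                 x = -1
--             else:
--                 x = i
--             break
--
--     if (x != 0):
--         if i == 0:
--             listOfInt.pop(0)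
--         else:
--             listOfInt.pop(i)
--         return countInts(listOfInt, num)
--     else:
--         return len(listOfInt)
--
-- def countInts(listOfInt, num):
--     n = 0
--     if(listOfInt != []):
--         if listOfInt[0] == num:
--             n = 1
--         return n + countInts(listOfInt[1:],num)
--
--     else:
--         return 0
-- ===== SOURCE B (Python) =====
-- def collectOddValues(listOfInt):
--     result = []
--     for x in listOfInt:
--         if x % 2 == 1:
--             result.append(x)
--     return result
-- ===== Notes on version B (the rewrite author's own statement) =====
-- stated objective: simpler
-- what changed: Replaces A's O(n^2) head-recursion with repeated list slicing and concatenation by a single iterative pass appending to an accumulator.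
import Mathlib
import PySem

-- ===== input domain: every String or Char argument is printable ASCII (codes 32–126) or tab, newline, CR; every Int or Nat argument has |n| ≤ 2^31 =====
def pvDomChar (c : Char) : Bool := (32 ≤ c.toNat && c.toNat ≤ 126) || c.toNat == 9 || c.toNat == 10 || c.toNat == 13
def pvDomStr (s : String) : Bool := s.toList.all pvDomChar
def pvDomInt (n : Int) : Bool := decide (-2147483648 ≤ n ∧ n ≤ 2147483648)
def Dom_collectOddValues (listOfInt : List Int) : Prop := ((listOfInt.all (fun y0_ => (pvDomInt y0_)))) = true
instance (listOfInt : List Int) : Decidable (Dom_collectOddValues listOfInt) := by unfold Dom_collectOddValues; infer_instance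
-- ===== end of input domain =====

-- B replaces A's head-recursion with slicing/concatenation by a single iterative pass with an accumulator (simpler, one pass).

-- ===== PORT A =====
-- literal transliteration of A's recursion: test head with Python's %, recurse on the tail slice
def collectOddValues (listOfInt : List Int) : List Int :=
  match listOfInt with
  | [] => []
  | x :: xs =>
    (if PySem.Int.mod x 2 == 1 then [x] else []) ++ collectOddValues xs

-- ===== PORT B =====
-- literal transliteration of B's loop: fold over the list, appending odd elements to the accumulator
def collectOddValues_alt (listOfInt : List Int) : List Int :=
  listOfInt.foldl (fun result x => if PySem.Int.mod x 2 == 1 then result ++ [x] else result) []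

-- ===== PRECONDITION & SPEC =====
def Spec_collectOddValues (listOfInt : List Int) (out : List Int) : Prop := out = collectOddValues_alt listOfInt
instance (listOfInt : List Int) (out : List Int) : Decidable (Spec_collectOddValues listOfInt out) := by unfold Spec_collectOddValues; infer_instance

-- ===== CLAIM (what is proved, stated in full; the proofs are below) =====
def Claim_equal_collectOddValues : Prop := ∀ (listOfInt : List Int), Dom_collectOddValues listOfInt → Spec_collectOddValues listOfInt (collectOddValues listOfInt)

-- ===== LEMMAS AND PROOFS =====

-- loop invariant: the fold started from accumulator `acc` returns `acc ++` A's result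
theorem collectOddValues_foldl_inv (xs : List Int) (acc : List Int) :
    xs.foldl (fun result x => if PySem.Int.mod x 2 == 1 then result ++ [x] else result) acc
      = acc ++ collectOddValues xs := by
  induction xs generalizing acc with
  | nil => simp [collectOddValues]
  | cons x xs ih =>
    simp only [List.foldl, collectOddValues]
    rw [ih]
    split <;> simp [List.append_assoc]

-- ===== VERDICT (by name: the statement is the Claim_ definition above) =====
theorem collectOddValues_spec : Claim_equal_collectOddValues := by
  intro l _
  unfold Spec_collectOddValues collectOddValues_alt
  rw [collectOddValues_foldl_inv]
  simp
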